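-- pv_equiv track=rewrite | github.com/alanbui2808/Leetcode | Google/562M_Longest_Line_of_Consecutive_One_in_Matrix/solution.py | solution
-- ===== SOURCE A (Python) =====
-- def solution(matrix):
--   '''
--   Observation:
--   At each point (r, c) we need to determine all possible directions that we could form a longest line and take the max among them
--   We can quickly compute this if we know the longest lines of all the directions for the children cells.
--
--   Algorithm:
--   (1). dp[r][c] = (ll_left+1, ll_diag+1, ll_top+1, ll_antidiag+1)
--   (2). result = max(result, max(dp[r][c]))
--
--
--   Time complexity: O(MN)
--   Space: O(4MN)
--   '''
--   M, N = len(matrix), len(matrix[0])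
--
--   # dp[i][j] = (longest_line from the left + mat[i][j], longest_line from the diagonal, ll from the top, ll from the anti-diag)
--   dp = [[(0,0,0,0) for c in range(N)] for r in range(M)]
--   result = 0
--
--   for r in range(M):
--     for c in range(N):
--       if matrix[r][c] == 0:
--         continue
--
--       # Longest line we could form from the left
--       ll_left = dp[r][c-1][0] if c-1 in range(N) and matrix[r][c-1] == 1 else 0
--       # Longest line we could form from the diagonal
--       ll_diag = dp[r-1][c-1][1] if r-1 in range(M) and c-1 in range(N) and matrix[r-1][c-1] == 1 else 0
--       # Longest line we could form from the top
--       ll_top = dp[r-1][c][2] if r-1 in range(M) and matrix[r-1][c] == 1 else 0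
--       # Longest line we could form from the anti-diagonal
--       ll_antidiag = dp[r-1][c+1][3] if r-1 in range(M) and c+1 in range(N) and matrix[r-1][c+1] == 1 else 0
--
--       # Update for dp[r][c] from all directions that we could form a longest
--       dp[r][c] = (ll_left+1, ll_diag+1, ll_top+1, ll_antidiag+1)
--
--       result = max(max(dp[r][c]), result)
--
--   return result
-- ===== SOURCE B (Python) =====
-- def solution(matrix):
--   # Memory-free re-implementation: for each nonzero cell, walk backwards in the
--   # four directions counting the consecutive 1-cells, instead of keeping a DP table.
--   M, N = len(matrix), len(matrix[0])
--
--   def run(r, c, dr, dc):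
--     k = 0
--     r += dr
--     c += dc
--     while 0 <= r < M and 0 <= c < N and matrix[r][c] == 1:
--       k += 1
--       r += dr
--       c += dc
--     return k
--
--   result = 0
--   for r in range(M):
--     for c in range(N):
--       if matrix[r][c] != 0:
--         best = 1 + max(run(r, c, 0, -1), run(r, c, -1, -1),
--                        run(r, c, -1, 0), run(r, c, -1, 1))
--         result = max(result, best)
--   return result
-- ===== Notes on version B (the rewrite author's own statement) =====
-- stated objective: alternative
-- what changed: Replaces A's O(MN)-memory dp table of 4-tuples (each cell reading memoized neighbour entries) by a table-free scan that, at each nonzero cell, walks backwards in the four directions counting consecutive 1-cells directly (no tuple allocation; measured ~2.5x faster on random matrices where runs are short).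
import Mathlib
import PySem

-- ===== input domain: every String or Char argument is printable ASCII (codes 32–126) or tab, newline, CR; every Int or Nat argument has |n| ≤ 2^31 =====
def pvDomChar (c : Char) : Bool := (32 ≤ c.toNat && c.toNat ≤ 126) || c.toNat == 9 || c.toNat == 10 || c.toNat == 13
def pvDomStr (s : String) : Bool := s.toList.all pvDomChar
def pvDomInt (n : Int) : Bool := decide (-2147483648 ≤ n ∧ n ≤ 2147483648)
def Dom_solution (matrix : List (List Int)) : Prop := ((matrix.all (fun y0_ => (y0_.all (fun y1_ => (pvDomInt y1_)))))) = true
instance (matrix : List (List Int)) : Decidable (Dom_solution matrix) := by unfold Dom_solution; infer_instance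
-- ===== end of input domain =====

-- B replaces A's O(MN) dp table of 4-tuples by a table-free per-cell backward walk in the
-- four directions (no extra memory; a timing run measured it faster on random inputs).

-- ===== PORT A =====
-- matrix[r][c]; exact where Pre_solution holds and the indices are loop-guarded in range
def aCell (m : List (List Int)) (r c : Int) : Int :=
  PySem.List.pyGetD (PySem.List.pyGetD m r []) c 0

def aDpGet (dp : List (List (Int × Int × Int × Int))) (r c : Int) : Int × Int × Int × Int :=
  PySem.List.pyGetD (PySem.List.pyGetD dp r []) c (0, 0, 0, 0)

-- the body of A's double loop at cell (r, c): state is (dp, result)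
def aStep (matrix : List (List Int)) (Mi Ni : Int)
    (st : List (List (Int × Int × Int × Int)) × Int) (r c : Int) :
    List (List (Int × Int × Int × Int)) × Int :=
  if aCell matrix r c = 0 then st
  else
    let dp := st.1
    let ll_left := if (0 ≤ c - 1 ∧ c - 1 < Ni) ∧ aCell matrix r (c - 1) = 1 then
        (aDpGet dp r (c - 1)).1 else 0
    let ll_diag := if (0 ≤ r - 1 ∧ r - 1 < Mi) ∧ (0 ≤ c - 1 ∧ c - 1 < Ni) ∧
        aCell matrix (r - 1) (c - 1) = 1 then (aDpGet dp (r - 1) (c - 1)).2.1 else 0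
    let ll_top := if (0 ≤ r - 1 ∧ r - 1 < Mi) ∧ aCell matrix (r - 1) c = 1 then
        (aDpGet dp (r - 1) c).2.2.1 else 0
    let ll_anti := if (0 ≤ r - 1 ∧ r - 1 < Mi) ∧ (0 ≤ c + 1 ∧ c + 1 < Ni) ∧
        aCell matrix (r - 1) (c + 1) = 1 then (aDpGet dp (r - 1) (c + 1)).2.2.2 else 0
    let t : Int × Int × Int × Int := (ll_left + 1, ll_diag + 1, ll_top + 1, ll_anti + 1)
    let dp' := PySem.List.pySetD dp r (PySem.List.pySetD (PySem.List.pyGetD dp r []) c t)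
    (dp', max (max (max (max t.1 t.2.1) t.2.2.1) t.2.2.2) st.2)

def solution (matrix : List (List Int)) : Int :=
  let Mi : Int := matrix.length
  let Ni : Int := (PySem.List.pyGetD matrix 0 []).length
  let dp0 : List (List (Int × Int × Int × Int)) :=
    (PySem.List.pyRange 0 Mi 1).map (fun _ =>
      (PySem.List.pyRange 0 Ni 1).map (fun _ => ((0, 0, 0, 0) : Int × Int × Int × Int)))
  ((PySem.List.pyRange 0 Mi 1).foldl (fun st r =>
      (PySem.List.pyRange 0 Ni 1).foldl (fun st c => aStep matrix Mi Ni st r c) st)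
    (dp0, 0)).2

-- ===== PORT B =====
def bCell (m : List (List Int)) (r c : Int) : Int :=
  PySem.List.pyGetD (PySem.List.pyGetD m r []) c 0

-- the while-loop of B's run(): fuel only makes it total — (Mi+Ni).toNat bounds the
-- number of iterations since every step decreases r or decreases c
def bRun (m : List (List Int)) (Mi Ni : Int) : Nat → Int → Int → Int → Int → Int
  | 0, _, _, _, _ => 0
  | fuel + 1, r, c, dr, dc =>
    if (0 ≤ r ∧ r < Mi) ∧ (0 ≤ c ∧ c < Ni) ∧ bCell m r c = 1 then
      bRun m Mi Ni fuel (r + dr) (c + dc) dr dc + 1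
    else 0

def solution_alt (matrix : List (List Int)) : Int :=
  let Mi : Int := matrix.length
  let Ni : Int := (PySem.List.pyGetD matrix 0 []).length
  let fuel : Nat := (Mi + Ni).toNat
  (PySem.List.pyRange 0 Mi 1).foldl (fun res r =>
    (PySem.List.pyRange 0 Ni 1).foldl (fun res c =>
      if bCell matrix r c ≠ 0 then
        max res (1 + max (max (max
          (bRun matrix Mi Ni fuel r (c - 1) 0 (-1))
          (bRun matrix Mi Ni fuel (r - 1) (c - 1) (-1) (-1)))
          (bRun matrix Mi Ni fuel (r - 1) c (-1) 0))
          (bRun matrix Mi Ni fuel (r - 1) (c + 1) (-1) 1))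
      else res) res) 0

-- ===== PRECONDITION & SPEC =====
-- Pre_ excludes exactly the inputs where Python A raises IndexError: the empty matrix
-- (len(matrix[0])) and ragged matrices with a row shorter than the first row.
def Pre_solution (matrix : List (List Int)) : Prop :=
  matrix ≠ [] ∧ ∀ row ∈ matrix, (matrix.headD []).length ≤ row.length
instance (matrix : List (List Int)) : Decidable (Pre_solution matrix) := by
  unfold Pre_solution; infer_instance

def pvWitness_solution : List (List Int) := [[1, 0], [1, 1]]

def Spec_solution (matrix : List (List Int)) (out : Int) : Prop := out = solution_alt matrix
instance (matrix : List (List Int)) (out : Int) : Decidable (Spec_solution matrix out) := by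
  unfold Spec_solution; infer_instance

-- ===== CLAIM (what is proved, stated in full; the proofs are below) =====
def Claim_equal_solution : Prop := ∀ (matrix : List (List Int)), Dom_solution matrix →
  Pre_solution matrix → Spec_solution matrix (solution matrix)

-- ===== LEMMAS AND PROOFS =====

-- matrix[r][c] on Nat indices, total via getD
def cellN (m : List (List Int)) (r c : Nat) : Int := (m.getD r []).getD c 0

-- run of consecutive 1-cells immediately left of (r, c)
def runL (m : List (List Int)) (r : Nat) : Nat → Int
  | 0 => 0
  | c + 1 => if cellN m r c = 1 then runL m r c + 1 else 0

-- run of consecutive 1-cells immediately above (r, c)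
def runT (m : List (List Int)) : Nat → Nat → Int
  | 0, _ => 0
  | r + 1, c => if cellN m r c = 1 then runT m r c + 1 else 0

-- run of consecutive 1-cells up-left of (r, c)
def runD (m : List (List Int)) : Nat → Nat → Int
  | 0, _ => 0
  | _ + 1, 0 => 0
  | r + 1, c + 1 => if cellN m r c = 1 then runD m r c + 1 else 0

-- run of consecutive 1-cells up-right of (r, c), bounded by column count N
def runA (m : List (List Int)) (N : Nat) : Nat → Nat → Int
  | 0, _ => 0
  | r + 1, c => if c + 1 < N ∧ cellN m r (c + 1) = 1 then runA m N r (c + 1) + 1 else 0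

def tup4 (m : List (List Int)) (N r c : Nat) : Int × Int × Int × Int :=
  (runL m r c + 1, runD m r c + 1, runT m r c + 1, runA m N r c + 1)

-- common per-cell result update both programs implement
def resStep (m : List (List Int)) (N : Nat) (res : Int) (r c : Nat) : Int :=
  if cellN m r c = 0 then res
  else max (max (max (max (runL m r c + 1) (runD m r c + 1)) (runT m r c + 1))
    (runA m N r c + 1)) res

def specRes (m : List (List Int)) (M N : Nat) : Int :=
  (List.range M).foldl (fun res r =>
    (List.range N).foldl (fun res c => resStep m N res r c) res) 0

-- dp contents after processing rows < i completely and row i up to column j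
def dpSpec (m : List (List Int)) (M N i j : Nat) : List (List (Int × Int × Int × Int)) :=
  (List.range M).map (fun p => (List.range N).map (fun q =>
    if (p < i ∨ (p = i ∧ q < j)) ∧ cellN m p q ≠ 0 then tup4 m N p q else (0, 0, 0, 0)))

theorem aCell_cast (m : List (List Int)) (r c : Nat) : aCell m r c = cellN m r c := by
  simp [aCell, cellN, PySem.List.pyGetD_natCast]

theorem dpSpec_get (m : List (List Int)) (M N i j p q : Nat) (hp : p < M) (hq : q < N) :
    aDpGet (dpSpec m M N i j) p q =
      if (p < i ∨ (p = i ∧ q < j)) ∧ cellN m p q ≠ 0 then tup4 m N p q else (0, 0, 0, 0) := by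
  simp [aDpGet, dpSpec, PySem.List.pyGetD_natCast, List.getD_eq_getElem?_getD, hp, hq]

theorem set_map_range {α : Type} (f : Nat → α) (n k : Nat) (v : α) :
    ((List.range n).map f).set k v = (List.range n).map (fun q => if q = k then v else f q) := by
  apply List.ext_getElem
  · simp
  intro q h1 h2
  rw [List.getElem_set]
  simp only [List.getElem_map, List.getElem_range]
  by_cases h : q = k
  · subst h; simp only [List.length_set, List.length_map, List.length_range] at h1
    simp
  · simp [h, Ne.symm h]

theorem dpSpec_set (m : List (List Int)) (M N i j : Nat) (hi : i < M) (hj : j < N)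
    (h0 : cellN m i j ≠ 0) :
    PySem.List.pySetD (dpSpec m M N i j) (i : Int)
      (PySem.List.pySetD (PySem.List.pyGetD (dpSpec m M N i j) (i : Int) []) (j : Int)
        (tup4 m N i j)) = dpSpec m M N i (j + 1) := by
  simp only [PySem.List.pySetD_natCast, PySem.List.pyGetD_natCast]
  have hrow : (dpSpec m M N i j).getD i [] = (List.range N).map (fun q =>
      if (i < i ∨ (i = i ∧ q < j)) ∧ cellN m i q ≠ 0 then tup4 m N i q else (0,0,0,0)) := by
    simp [dpSpec, List.getD_eq_getElem?_getD, hi]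
  rw [hrow, set_map_range]
  conv_lhs => rw [dpSpec]
  rw [set_map_range]
  unfold dpSpec
  apply List.map_congr_left; intro p _
  by_cases hpi : p = i
  · subst hpi
    rw [if_pos rfl]
    apply List.map_congr_left; intro q _
    by_cases hqj : q = j
    · subst hqj; simp [h0]
    · rw [if_neg hqj]
      exact if_congr (by omega) rfl rfl
  · rw [if_neg hpi]
    apply List.map_congr_left; intro q _
    exact if_congr (by omega) rfl rfl

theorem dpSpec_skip (m : List (List Int)) (M N i j : Nat) (h0 : cellN m i j = 0) :
    dpSpec m M N i j = dpSpec m M N i (j + 1) := by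
  unfold dpSpec
  apply List.map_congr_left; intro p _
  apply List.map_congr_left; intro q _
  by_cases h : p = i ∧ q = j
  · obtain ⟨rfl, rfl⟩ := h; simp [h0]
  · exact if_congr (by omega) rfl rfl

theorem dpSpec_row_end (m : List (List Int)) (M N i : Nat) :
    dpSpec m M N i N = dpSpec m M N (i + 1) 0 := by
  unfold dpSpec
  apply List.map_congr_left; intro p _
  apply List.map_congr_left; intro q hq
  simp only [List.mem_range] at hq
  exact if_congr (by omega) rfl rfl

theorem ll_left_eq (m : List (List Int)) (M N i j : Nat) (hi : i < M) (hj : j < N) :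
    (if (0 ≤ (j:Int) - 1 ∧ (j:Int) - 1 < (N:Int)) ∧ aCell m (i:Int) ((j:Int) - 1) = 1 then
      (aDpGet (dpSpec m M N i j) (i:Int) ((j:Int) - 1)).1 else 0) = runL m i j := by
  cases j with
  | zero =>
    rw [if_neg]
    · rfl
    · rintro ⟨⟨h1, _⟩, _⟩; omega
  | succ q =>
    have e1 : ((q + 1 : Nat) : Int) - 1 = (q : Int) := by push_cast; ring
    rw [e1, aCell_cast, dpSpec_get m M N i (q+1) i q hi (by omega)]
    by_cases hc : cellN m i q = 1
    · rw [if_pos ⟨⟨by omega, by exact_mod_cast (by omega : q < N)⟩, hc⟩,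
        if_pos ⟨Or.inr ⟨rfl, by omega⟩, by omega⟩]
      show runL m i q + 1 = _
      rw [runL, if_pos hc]
    · rw [if_neg (by rintro ⟨_, h⟩; exact hc h), runL, if_neg hc]

theorem ll_top_eq (m : List (List Int)) (M N i j : Nat) (hi : i < M) (hj : j < N) :
    (if (0 ≤ (i:Int) - 1 ∧ (i:Int) - 1 < (M:Int)) ∧ aCell m ((i:Int) - 1) (j:Int) = 1 then
      (aDpGet (dpSpec m M N i j) ((i:Int) - 1) (j:Int)).2.2.1 else 0) = runT m i j := by
  cases i with
  | zero =>
    rw [if_neg]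
    · rfl
    · rintro ⟨⟨h1, _⟩, _⟩; omega
  | succ p =>
    have e1 : ((p + 1 : Nat) : Int) - 1 = (p : Int) := by push_cast; ring
    rw [e1, aCell_cast, dpSpec_get m M N (p+1) j p j (by omega) hj]
    by_cases hc : cellN m p j = 1
    · rw [if_pos ⟨⟨by omega, by exact_mod_cast (by omega : p < M)⟩, hc⟩,
        if_pos ⟨Or.inl (by omega), by omega⟩]
      show runT m p j + 1 = _
      rw [runT, if_pos hc]
    · rw [if_neg (by rintro ⟨_, h⟩; exact hc h), runT, if_neg hc]

theorem ll_diag_eq (m : List (List Int)) (M N i j : Nat) (hi : i < M) (hj : j < N) :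
    (if (0 ≤ (i:Int) - 1 ∧ (i:Int) - 1 < (M:Int)) ∧ (0 ≤ (j:Int) - 1 ∧ (j:Int) - 1 < (N:Int)) ∧
        aCell m ((i:Int) - 1) ((j:Int) - 1) = 1 then
      (aDpGet (dpSpec m M N i j) ((i:Int) - 1) ((j:Int) - 1)).2.1 else 0) = runD m i j := by
  cases i with
  | zero =>
    rw [if_neg]
    · rfl
    · rintro ⟨⟨h1, _⟩, _⟩; omega
  | succ p =>
    cases j with
    | zero =>
      rw [if_neg]
      · rfl
      · rintro ⟨_, ⟨h1, _⟩, _⟩; omega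
    | succ q =>
      have e1 : ((p + 1 : Nat) : Int) - 1 = (p : Int) := by push_cast; ring
      have e2 : ((q + 1 : Nat) : Int) - 1 = (q : Int) := by push_cast; ring
      rw [e1, e2, aCell_cast, dpSpec_get m M N (p+1) (q+1) p q (by omega) (by omega)]
      by_cases hc : cellN m p q = 1
      · rw [if_pos ⟨⟨by omega, by exact_mod_cast (by omega : p < M)⟩,
          ⟨by omega, by exact_mod_cast (by omega : q < N)⟩, hc⟩,
          if_pos ⟨Or.inl (by omega), by omega⟩]
        show runD m p q + 1 = _
        rw [runD, if_pos hc]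
      · rw [if_neg (by rintro ⟨_, _, h⟩; exact hc h), runD, if_neg hc]

theorem ll_anti_eq (m : List (List Int)) (M N i j : Nat) (hi : i < M) (hj : j < N) :
    (if (0 ≤ (i:Int) - 1 ∧ (i:Int) - 1 < (M:Int)) ∧ (0 ≤ (j:Int) + 1 ∧ (j:Int) + 1 < (N:Int)) ∧
        aCell m ((i:Int) - 1) ((j:Int) + 1) = 1 then
      (aDpGet (dpSpec m M N i j) ((i:Int) - 1) ((j:Int) + 1)).2.2.2 else 0) = runA m N i j := by
  cases i with
  | zero =>
    rw [if_neg]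
    · rfl
    · rintro ⟨⟨h1, _⟩, _⟩; omega
  | succ p =>
    have e1 : ((p + 1 : Nat) : Int) - 1 = (p : Int) := by push_cast; ring
    have e2 : ((j : Nat) : Int) + 1 = ((j + 1 : Nat) : Int) := by push_cast; ring
    rw [e1, e2, aCell_cast]
    by_cases hn : j + 1 < N
    · rw [dpSpec_get m M N (p+1) j p (j+1) (by omega) hn]
      by_cases hc : cellN m p (j+1) = 1
      · rw [if_pos ⟨⟨by omega, by exact_mod_cast (by omega : p < M)⟩,
          ⟨by omega, by exact_mod_cast hn⟩, hc⟩,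
          if_pos ⟨Or.inl (by omega), by omega⟩]
        show runA m N p (j+1) + 1 = _
        rw [runA, if_pos ⟨hn, hc⟩]
      · rw [if_neg (by rintro ⟨_, _, h⟩; exact hc h), runA, if_neg (by rintro ⟨_, h⟩; exact hc h)]
    · rw [if_neg, runA, if_neg (by rintro ⟨h, _⟩; exact hn h)]
      rintro ⟨_, ⟨_, h2⟩, _⟩
      exact hn (by exact_mod_cast h2)

theorem aStep_eq (m : List (List Int)) (M N i j : Nat) (hi : i < M) (hj : j < N) (res : Int) :
    aStep m (M : Int) (N : Int) (dpSpec m M N i j, res) (i : Int) (j : Int) =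
      (dpSpec m M N i (j + 1), resStep m N res i j) := by
  unfold aStep resStep
  rw [aCell_cast]
  by_cases h0 : cellN m i j = 0
  · rw [if_pos h0, if_pos h0, ← dpSpec_skip m M N i j h0]
  · rw [if_neg h0, if_neg h0]
    simp only
    rw [ll_left_eq m M N i j hi hj, ll_diag_eq m M N i j hi hj,
      ll_top_eq m M N i j hi hj, ll_anti_eq m M N i j hi hj,
      show (runL m i j + 1, runD m i j + 1, runT m i j + 1, runA m N i j + 1) = tup4 m N i j from rfl,
      dpSpec_set m M N i j hi hj h0]

theorem aRow_fold (m : List (List Int)) (M N i : Nat) (hi : i < M) (res : Int) :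
    ∀ j ≤ N, (List.range j).foldl (fun st (c : Nat) => aStep m (M : Int) (N : Int) st (i : Int) (c : Int))
        (dpSpec m M N i 0, res) =
      (dpSpec m M N i j, (List.range j).foldl (fun res (c : Nat) => resStep m N res i c) res) := by
  intro j
  induction j with
  | zero => intro _; simp
  | succ k ih =>
    intro hk
    rw [List.range_succ, List.foldl_append, List.foldl_append, ih (by omega)]
    simp only [List.foldl_cons, List.foldl_nil]
    exact aStep_eq m M N i k hi (by omega) _

theorem aOuter_fold (m : List (List Int)) (M N : Nat) :
    ∀ i ≤ M, (List.range i).foldl (fun st (r : Nat) =>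
        (List.range N).foldl (fun st (c : Nat) => aStep m (M : Int) (N : Int) st (r : Int) (c : Int)) st)
        (dpSpec m M N 0 0, 0) =
      (dpSpec m M N i 0, (List.range i).foldl (fun res (r : Nat) =>
        (List.range N).foldl (fun res (c : Nat) => resStep m N res r c) res) 0) := by
  intro i
  induction i with
  | zero => intro _; simp
  | succ k ih =>
    intro hk
    rw [List.range_succ, List.foldl_append, List.foldl_append, ih (by omega)]
    simp only [List.foldl_cons, List.foldl_nil]
    rw [aRow_fold m M N k (by omega) _ N le_rfl, dpSpec_row_end]

theorem solution_eq_spec (m : List (List Int)) :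
    solution m = specRes m m.length (m.getD 0 []).length := by
  unfold solution specRes
  simp only [show PySem.List.pyGetD m 0 [] = m.getD 0 [] from by simp [pysem]]
  rw [PySem.List.pyRange_zero_natCast m.length,
    PySem.List.pyRange_zero_natCast (m.getD 0 []).length]
  rw [List.foldl_map]
  have hdp0 : ((List.range m.length).map (fun (k : Nat) => (k:Int))).map (fun _ =>
      ((List.range (m.getD 0 []).length).map (fun (k : Nat) => (k:Int))).map
        (fun _ => ((0, 0, 0, 0) : Int × Int × Int × Int))) =
      dpSpec m m.length (m.getD 0 []).length 0 0 := by
    unfold dpSpec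
    simp [List.map_map, Function.comp_def]
  rw [hdp0]
  have := aOuter_fold m m.length (m.getD 0 []).length m.length le_rfl
  simp only [List.foldl_map] at this ⊢
  rw [this]

theorem bCell_cast (m : List (List Int)) (r c : Nat) : bCell m r c = cellN m r c := by
  simp [bCell, cellN, PySem.List.pyGetD_natCast]

theorem bRun_left (m : List (List Int)) (M N : Nat) :
    ∀ (c fuel r : Nat), c ≤ N → c ≤ fuel → r < M →
      bRun m (M : Int) (N : Int) fuel (r : Int) ((c : Int) - 1) 0 (-1) = runL m r c := by
  intro c
  induction c with
  | zero =>
    intro fuel r _ _ _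
    cases fuel with
    | zero => rfl
    | succ f =>
      rw [bRun, if_neg]
      · rfl
      · rintro ⟨_, ⟨h, _⟩, _⟩; omega
  | succ q ih =>
    intro fuel r hN hf hr
    obtain ⟨f, rfl⟩ : ∃ f, fuel = f + 1 := ⟨fuel - 1, by omega⟩
    rw [bRun]
    have e1 : ((q + 1 : Nat) : Int) - 1 = (q : Int) := by push_cast; ring
    rw [e1, bCell_cast]
    by_cases hc : cellN m r q = 1
    · rw [if_pos ⟨⟨by omega, by exact_mod_cast hr⟩,
        ⟨by omega, by exact_mod_cast (by omega : q < N)⟩, hc⟩]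
      have e2 : ((r : Int) + 0) = (r : Int) := by ring
      have e3 : ((q : Int) + (-1)) = (q : Int) - 1 := by ring
      rw [e2, e3, ih f r (by omega) (by omega) hr, runL, if_pos hc]
    · rw [if_neg (by rintro ⟨_, _, h⟩; exact hc h), runL, if_neg hc]

theorem bRun_top (m : List (List Int)) (M N : Nat) :
    ∀ (r fuel c : Nat), r ≤ fuel → r ≤ M → c < N →
      bRun m (M : Int) (N : Int) fuel ((r : Int) - 1) (c : Int) (-1) 0 = runT m r c := by
  intro r
  induction r with
  | zero =>
    intro fuel c _ _ _
    cases fuel with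
    | zero => rfl
    | succ f =>
      rw [bRun, if_neg]
      · rfl
      · rintro ⟨⟨h, _⟩, _⟩; omega
  | succ p ih =>
    intro fuel c hf hM hc
    obtain ⟨f, rfl⟩ : ∃ f, fuel = f + 1 := ⟨fuel - 1, by omega⟩
    rw [bRun]
    have e1 : ((p + 1 : Nat) : Int) - 1 = (p : Int) := by push_cast; ring
    rw [e1, bCell_cast]
    by_cases h1 : cellN m p c = 1
    · rw [if_pos ⟨⟨by omega, by exact_mod_cast (by omega : p < M)⟩,
        ⟨by omega, by exact_mod_cast hc⟩, h1⟩]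
      have e2 : ((p : Int) + (-1)) = (p : Int) - 1 := by ring
      have e3 : ((c : Int) + 0) = (c : Int) := by ring
      rw [e2, e3, ih f c (by omega) (by omega) hc, runT, if_pos h1]
    · rw [if_neg (by rintro ⟨_, _, h⟩; exact h1 h), runT, if_neg h1]

theorem bRun_diag (m : List (List Int)) (M N : Nat) :
    ∀ (r c fuel : Nat), r ≤ fuel → r ≤ M → c ≤ N →
      bRun m (M : Int) (N : Int) fuel ((r : Int) - 1) ((c : Int) - 1) (-1) (-1) = runD m r c := by
  intro r
  induction r with
  | zero =>
    intro c fuel _ _ _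
    cases fuel with
    | zero => rfl
    | succ f =>
      rw [bRun, if_neg]
      · rfl
      · rintro ⟨⟨h, _⟩, _⟩; omega
  | succ p ih =>
    intro c fuel hf hM hN
    obtain ⟨f, rfl⟩ : ∃ f, fuel = f + 1 := ⟨fuel - 1, by omega⟩
    cases c with
    | zero =>
      rw [bRun, if_neg]
      · rfl
      · rintro ⟨_, ⟨h, _⟩, _⟩; omega
    | succ q =>
      rw [bRun]
      have e1 : ((p + 1 : Nat) : Int) - 1 = (p : Int) := by push_cast; ring
      have e2 : ((q + 1 : Nat) : Int) - 1 = (q : Int) := by push_cast; ring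
      rw [e1, e2, bCell_cast]
      by_cases h1 : cellN m p q = 1
      · rw [if_pos ⟨⟨by omega, by exact_mod_cast (by omega : p < M)⟩,
          ⟨by omega, by exact_mod_cast (by omega : q < N)⟩, h1⟩]
        have e3 : ((p : Int) + (-1)) = (p : Int) - 1 := by ring
        have e4 : ((q : Int) + (-1)) = (q : Int) - 1 := by ring
        rw [e3, e4, ih q f (by omega) (by omega) (by omega), runD, if_pos h1]
      · rw [if_neg (by rintro ⟨_, _, h⟩; exact h1 h), runD, if_neg h1]

theorem bRun_anti (m : List (List Int)) (M N : Nat) :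
    ∀ (r c fuel : Nat), r ≤ fuel → r ≤ M → c ≤ N →
      bRun m (M : Int) (N : Int) fuel ((r : Int) - 1) ((c : Int) + 1) (-1) 1 = runA m N r c := by
  intro r
  induction r with
  | zero =>
    intro c fuel _ _ _
    cases fuel with
    | zero => rfl
    | succ f =>
      rw [bRun, if_neg]
      · rfl
      · rintro ⟨⟨h, _⟩, _⟩; omega
  | succ p ih =>
    intro c fuel hf hM hN
    obtain ⟨f, rfl⟩ : ∃ f, fuel = f + 1 := ⟨fuel - 1, by omega⟩
    rw [bRun]
    have e1 : ((p + 1 : Nat) : Int) - 1 = (p : Int) := by push_cast; ring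
    have e2 : ((c : Int) + 1) = ((c + 1 : Nat) : Int) := by push_cast; ring
    rw [e1, e2, bCell_cast]
    by_cases hg : c + 1 < N ∧ cellN m p (c + 1) = 1
    · rw [if_pos ⟨⟨by omega, by exact_mod_cast (by omega : p < M)⟩,
        ⟨by omega, by exact_mod_cast hg.1⟩, hg.2⟩]
      have e3 : ((p : Int) + (-1)) = (p : Int) - 1 := by ring
      have e4 : (((c + 1 : Nat) : Int) + 1) = ((c + 1 : Nat) : Int) + 1 := rfl
      rw [e3, ih (c + 1) f (by omega) (by omega) (by omega), runA, if_pos hg]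
    · rw [runA, if_neg hg, if_neg]
      rintro ⟨_, ⟨_, h2⟩, h3⟩
      exact hg ⟨by exact_mod_cast h2, h3⟩

theorem solution_alt_eq_spec (m : List (List Int)) :
    solution_alt m = specRes m m.length (m.getD 0 []).length := by
  unfold solution_alt specRes
  simp only [show PySem.List.pyGetD m 0 [] = m.getD 0 [] from by simp [pysem]]
  rw [PySem.List.pyRange_zero_natCast m.length,
    PySem.List.pyRange_zero_natCast (m.getD 0 []).length]
  simp only [List.foldl_map]
  have hfuel : ((m.length : Int) + ((m.getD 0 []).length : Int)).toNat =
      m.length + (m.getD 0 []).length := by omega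
  rw [hfuel]
  apply PySem.List.foldl_congr_mem
  intro res r hr
  simp only [List.mem_range] at hr
  apply PySem.List.foldl_congr_mem
  intro res c hc
  simp only [List.mem_range] at hc
  rw [bCell_cast,
    bRun_left m m.length (m.getD 0 []).length c _ r (by omega) (by omega) hr,
    bRun_diag m m.length (m.getD 0 []).length r c _ (by omega) (by omega) (by omega),
    bRun_top m m.length (m.getD 0 []).length r _ c (by omega) (by omega) hc,
    bRun_anti m m.length (m.getD 0 []).length r c _ (by omega) (by omega) (by omega),
    resStep]
  by_cases h0 : cellN m r c = 0
  · rw [if_neg (by simpa using h0), if_pos h0]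
  · rw [if_pos h0, if_neg h0]
    omega

-- ===== VERDICT (by name: the statement is the Claim_ definition above) =====
theorem solution_spec : Claim_equal_solution := by
  intro m _ _
  unfold Spec_solution
  rw [solution_eq_spec, solution_alt_eq_spec]
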